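-- pv_equiv track=rewrite | github.com/Davosky555/SIP_met | mwwl8422.py | sort_sns_list
-- ===== SOURCE A (Python) =====
-- def sort_sns_list(list_item, list_label, old_list, new_list):
--     for lst in list_item:
--         try:
--             new_list.append(old_list.pop(list_label.index(lst)))
--             list_label.pop(list_label.index(lst))
--         except ValueError:
--             return list_item, old_list, new_list
--     return list_label, old_list, new_list
-- ===== SOURCE B (Python) =====
-- def sort_sns_list(list_item, list_label, old_list, new_list):
--     # One pass: index every label's positions once, then consume them FIFO via
--     # cursors; the remainders are rebuilt by filtering out consumed positions.
--     # Performs the same in-place mutation of list_label/old_list/new_list as A.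
--     pos = {}
--     for i, lab in enumerate(list_label):
--         pos.setdefault(lab, []).append(i)
--     nxt = {}
--     consumed = set()
--     ok = True
--     taken = []
--     for lst in list_item:
--         q = pos.get(lst, ())
--         k = nxt.get(lst, 0)
--         if k >= len(q):
--             ok = False
--             break
--         i = q[k]
--         nxt[lst] = k + 1
--         consumed.add(i)
--         taken.append(old_list[i])
--     new_list.extend(taken)
--     old_list[:] = [v for j, v in enumerate(old_list) if j not in consumed]
--     list_label[:] = [v for j, v in enumerate(list_label) if j not in consumed]
--     if ok:
--         return list_label, old_list, new_list
--     return list_item, old_list, new_list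
-- ===== Notes on version B (the rewrite author's own statement) =====
-- stated objective: alternative
-- what changed: Replaces the per-item linear label scan plus two in-place pops with a one-time dict of label->position-queues consumed via cursors and a consumed-set filter that rebuilds the remainders at the end (O(n+m) worst case vs A's O(m*n) worst case, though A's early ValueError exit makes it fast on typical random inputs).
import Mathlib
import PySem

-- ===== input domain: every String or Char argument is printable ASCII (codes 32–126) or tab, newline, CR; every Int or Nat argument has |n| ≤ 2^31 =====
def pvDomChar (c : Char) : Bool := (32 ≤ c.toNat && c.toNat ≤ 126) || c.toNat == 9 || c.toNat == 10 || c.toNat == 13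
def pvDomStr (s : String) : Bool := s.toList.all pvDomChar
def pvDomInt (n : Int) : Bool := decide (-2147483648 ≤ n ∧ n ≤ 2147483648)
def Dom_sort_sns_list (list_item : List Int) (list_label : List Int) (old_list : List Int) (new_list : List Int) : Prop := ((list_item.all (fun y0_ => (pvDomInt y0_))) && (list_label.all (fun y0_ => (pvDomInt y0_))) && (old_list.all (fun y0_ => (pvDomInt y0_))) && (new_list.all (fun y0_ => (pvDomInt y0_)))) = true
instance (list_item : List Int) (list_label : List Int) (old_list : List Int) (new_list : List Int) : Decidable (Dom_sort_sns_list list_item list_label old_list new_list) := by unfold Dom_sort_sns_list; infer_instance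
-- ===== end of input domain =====

-- B replaces A's per-item label scan + in-place pops by a one-time position index consumed
-- via cursors (a different algorithm, not measured faster); equivalence is about return
-- values (in Python both A and B mutate list_label/old_list/new_list the same way in place).


-- ===== PORT A =====
-- the loop over list_item; state = (list_label, old_list, new_list) mutated in place by A
def sortAgo (item0 : List Int) : List Int → List Int → List Int → List Int → List Int × List Int × List Int
  | [], lab, _old, nw => (lab, _old, nw)
  | lst :: rest, lab, old, nw =>
    match PySem.List.index? lab lst with
    | none => (item0, old, nw)                        -- ValueError caught: return list_item, old_list, new_list
    | some idx =>
      match PySem.List.pop? old (idx : Int) with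
      | none => ([], [], [])                          -- IndexError: Python raises here; outside Pre_
      | some (v, old') =>
        match PySem.List.index? lab lst with          -- second list_label.index(lst)
        | none => (item0, old', nw ++ [v])            -- ValueError caught (unreachable)
        | some idx2 =>
          match PySem.List.pop? lab (idx2 : Int) with
          | none => ([], [], [])                      -- IndexError: Python raises (unreachable)
          | some (_, lab') => sortAgo item0 rest lab' old' (nw ++ [v])

def sort_sns_list (list_item : List Int) (list_label : List Int) (old_list : List Int) (new_list : List Int) : List Int × List Int × List Int :=
  sortAgo list_item list_item list_label old_list new_list

-- ===== PORT B =====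
-- the consuming loop of Source B; returns (consumed, taken, ok)
def altLoop (old : List Int) (pos : PySem.Dict Int (List Int)) :
    List Int → PySem.Dict Int Int → PySem.Set Int → List Int → PySem.Set Int × List Int × Bool
  | [], _nxt, c, taken => (c, taken, true)
  | lst :: rest, nxt, c, taken =>
    let q := pos.getD lst []
    let k := nxt.getD lst 0
    if (q.length : Int) ≤ k then (c, taken, false)    -- python: if k >= len(q)
    else
      altLoop old pos rest (nxt.insert lst (k + 1))
        (PySem.Set.add c (PySem.List.pyGetD q k 0))
        (taken ++ [PySem.List.pyGetD old (PySem.List.pyGetD q k 0) 0])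

def sort_sns_list_alt (list_item : List Int) (list_label : List Int) (old_list : List Int) (new_list : List Int) : List Int × List Int × List Int :=
  let pos := (PySem.List.enumerate list_label 0).foldl
      (fun d p => d.modify p.2 [] (· ++ [p.1])) PySem.Dict.empty
  match altLoop old_list pos list_item PySem.Dict.empty PySem.Set.empty [] with
  | (consumed, taken, ok) =>
    let new' := new_list ++ taken
    let old' := ((PySem.List.enumerate old_list 0).filter
        (fun p => !(PySem.Set.contains consumed p.1))).map (·.2)
    let lab' := ((PySem.List.enumerate list_label 0).filter
        (fun p => !(PySem.Set.contains consumed p.1))).map (·.2)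
    if ok then (lab', old', new') else (list_item, old', new')

-- ===== PRECONDITION & SPEC =====
-- aReturns traces only the raise condition of A's loop: at each matched label, the found
-- index must be inside the shrinking old_list, else A's old_list.pop raises IndexError.
def aReturns : List Int → List Int → Nat → Bool
  | [], _, _ => true
  | lst :: rest, lab, o =>
    match PySem.List.index? lab lst with
    | none => true                                    -- ValueError is caught: A returns
    | some idx => if idx < o then aReturns rest (lab.eraseIdx idx) (o - 1) else false

-- Pre_ excludes EXACTLY the inputs on which A raises (IndexError from old_list.pop when a
-- matched label's index reaches beyond the shrunken old_list); it excludes no input on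
-- which A returns a value.
def Pre_sort_sns_list (list_item : List Int) (list_label : List Int) (old_list : List Int) (new_list : List Int) : Prop :=
  aReturns list_item list_label old_list.length = true
instance (list_item : List Int) (list_label : List Int) (old_list : List Int) (new_list : List Int) : Decidable (Pre_sort_sns_list list_item list_label old_list new_list) := by unfold Pre_sort_sns_list; infer_instance

def pvWitness_sort_sns_list : List Int × List Int × List Int × List Int :=
  ([1, 2], [2, 1], [10, 20], [])

def Spec_sort_sns_list (list_item : List Int) (list_label : List Int) (old_list : List Int) (new_list : List Int) (out : List Int × List Int × List Int) : Prop := out = sort_sns_list_alt list_item list_label old_list new_list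
instance (list_item : List Int) (list_label : List Int) (old_list : List Int) (new_list : List Int) (out : List Int × List Int × List Int) : Decidable (Spec_sort_sns_list list_item list_label old_list new_list out) := by unfold Spec_sort_sns_list; infer_instance

-- ===== CLAIM (what is proved, stated in full; the proofs are below) =====
def Claim_equal_sort_sns_list : Prop := ∀ (list_item : List Int) (list_label : List Int) (old_list : List Int) (new_list : List Int), Dom_sort_sns_list list_item list_label old_list new_list → Pre_sort_sns_list list_item list_label old_list new_list → Spec_sort_sns_list list_item list_label old_list new_list (sort_sns_list list_item list_label old_list new_list)

-- ===== LEMMAS AND PROOFS =====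

-- remaining (unconsumed) (position, value) pairs of an enumerated list
def pvRem (C : PySem.Set Int) (E : List (Int × Int)) : List (Int × Int) :=
  E.filter (fun e => !(PySem.Set.contains C e.1))

-- the position queue of a label
def pvQ (E : List (Int × Int)) (l : Int) : List Int :=
  (E.filter (fun e => e.2 == l)).map (·.1)

def pvBuild (L : List Int) : PySem.Dict Int (List Int) :=
  (PySem.List.enumerate L 0).foldl (fun d p => d.modify p.2 [] (· ++ [p.1])) PySem.Dict.empty

def pvFinish (item0 L O new_list : List Int) (st : PySem.Set Int × List Int × Bool) :
    List Int × List Int × List Int :=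
  match st with
  | (consumed, taken, ok) =>
    let new' := new_list ++ taken
    let old' := ((PySem.List.enumerate O 0).filter
        (fun p => !(PySem.Set.contains consumed p.1))).map (·.2)
    let lab' := ((PySem.List.enumerate L 0).filter
        (fun p => !(PySem.Set.contains consumed p.1))).map (·.2)
    if ok then (lab', old', new') else (item0, old', new')

theorem pv_alt_eq (li L O nl : List Int) :
    sort_sns_list_alt li L O nl
      = pvFinish li L O nl (altLoop O (pvBuild L) li PySem.Dict.empty PySem.Set.empty []) := by
  rfl

theorem pv_enum_fst_nodup {α : Type} (xs : List α) (s : Int) :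
    ((PySem.List.enumerate xs s).map (·.1)).Nodup := by
  have hp := PySem.List.pairwise_lt_enumerate xs s
  exact (List.pairwise_map.mpr hp).imp ne_of_lt

theorem pv_getD_build_gen (l : List (Int × Int)) (d : PySem.Dict Int (List Int)) (c : Int) :
    (l.foldl (fun d p => d.modify p.2 [] (· ++ [p.1])) d).getD c []
      = d.getD c [] ++ (l.filter (fun p => p.2 == c)).map (·.1) := by
  induction l generalizing d with
  | nil => simp
  | cons p t ih =>
    simp only [List.foldl_cons, ih, List.filter_cons]
    by_cases hc : p.2 = c
    · simp [PySem.Dict.getD_modify, hc, List.append_assoc]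
    · have : (p.2 == c) = false := by simp [hc]
      rw [PySem.Dict.getD_modify, if_neg (fun h => hc h.symm)]
      simp [this]

theorem pv_build_q (L : List Int) (c : Int) :
    (pvBuild L).getD c [] = pvQ (PySem.List.enumerate L 0) c := by
  unfold pvBuild pvQ
  rw [pv_getD_build_gen, PySem.Dict.getD_empty, List.nil_append]

theorem pvQ_nodup (E : List (Int × Int))
    (hn : (E.map (·.1)).Nodup) (l : Int) :
    ((E.filter (fun e => e.2 == l)).map (·.1)).Nodup :=
  List.Nodup.sublist (List.Sublist.map _ List.filter_sublist) hn

theorem pv_mem_q {E : List (Int × Int)} {l j : Int} :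
    j ∈ pvQ E l ↔ ∃ e ∈ E, e.1 = j ∧ e.2 = l := by
  simp only [pvQ, List.mem_map, List.mem_filter, beq_iff_eq]
  constructor
  · rintro ⟨e, ⟨he, hl⟩, hj⟩; exact ⟨e, he, hj, hl⟩
  · rintro ⟨e, he, hj, hl⟩; exact ⟨e, ⟨he, hl⟩, hj⟩

theorem pv_contains_add (C : PySem.Set Int) (i j : Int) :
    PySem.Set.contains (PySem.Set.add C i) j = (PySem.Set.contains C j || (j == i)) := by
  by_cases h : j ∈ PySem.Set.add C i
  · rw [(PySem.Set.contains_iff _ _).mpr h]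
    rcases (PySem.Set.mem_add _ _ _).mp h with h' | h'
    · rw [(PySem.Set.contains_iff _ _).mpr h']; simp
    · simp [h']
  · have h1 : PySem.Set.contains (PySem.Set.add C i) j = false := by
      rcases hb : PySem.Set.contains (PySem.Set.add C i) j with _ | _
      · rfl
      · exact absurd ((PySem.Set.contains_iff _ _).mp hb) h
    have h2 : PySem.Set.contains C j = false := by
      rcases hb : PySem.Set.contains C j with _ | _
      · rfl
      · exact absurd ((PySem.Set.mem_add C i j).mpr (Or.inl ((PySem.Set.contains_iff _ _).mp hb))) h
    have h3 : (j == i) = false := by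
      rcases hb : j == i with _ | _
      · rfl
      · exact absurd ((PySem.Set.mem_add C i j).mpr (Or.inr (by simpa using hb))) h
    rw [h1, h2, h3]
    rfl

theorem pv_contains_add_of_ne {C : PySem.Set Int} {i j : Int} (hne : j ≠ i) :
    PySem.Set.contains (PySem.Set.add C i) j = PySem.Set.contains C j := by
  rw [pv_contains_add]
  simp [hne]

theorem pv_filter_add_of_not_mem (q : List Int) (i : Int) (hi : i ∉ q) (C : PySem.Set Int) :
    q.filter (fun j => PySem.Set.contains (PySem.Set.add C i) j)
      = q.filter (fun j => PySem.Set.contains C j) := by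
  apply List.filter_congr
  intro j hj
  exact pv_contains_add_of_ne (fun h => hi (h ▸ hj))

theorem pv_prefix_gen : ∀ (q : List Int) (k : Nat) (p p' : Int → Bool) (v : Int),
    q.Nodup → k < q.length → (∀ j, p' j = (p j || (j == v))) → (∀ hk : k < q.length, v = q[k]) →
    q.filter p = q.take k → q.filter p' = q.take (k + 1) := by
  intro q
  induction q with
  | nil => intro k _ _ _ _ hk; simp at hk
  | cons a t ih =>
    intro k p p' v hnd hk hpp hv hC
    have hat : a ∉ t := (List.nodup_cons.mp hnd).1
    have hndt : t.Nodup := (List.nodup_cons.mp hnd).2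
    cases k with
    | zero =>
      have hva : v = a := by simpa using hv hk
      rcases hpa : p a with _ | _
      · have hCt : t.filter p = [] := by simpa [List.filter_cons, hpa] using hC
        have hpt : ∀ j ∈ t, p j = false := by
          intro j hj
          rcases hb : p j with _ | _
          · rfl
          · exact absurd (List.mem_filter.mpr ⟨hj, hb⟩) (by simp [hCt])
        have hhead : p' a = true := by rw [hpp a, hpa, hva]; simp
        have htail : t.filter p' = [] := by
          apply List.filter_eq_nil_iff.mpr
          intro j hj
          rw [hpp j, hpt j hj, hva]
          simp
          exact fun h : j = a => hat (h ▸ hj)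
        simp [List.filter_cons, hhead, htail]
      · exfalso
        have := hC
        simp [List.filter_cons, hpa] at this
    | succ k =>
      rcases hpa : p a with _ | _
      · exfalso
        have hC' : t.filter p = a :: List.take k t := by
          simpa [List.filter_cons, hpa] using hC
        have hmem : a ∈ a :: List.take k t := List.mem_cons_self ..
        rw [← hC'] at hmem
        exact hat (List.mem_of_mem_filter hmem)
      · have hkt : k < t.length := by simpa using hk
        have hCt : t.filter p = List.take k t := by
          simpa [List.filter_cons, hpa] using hC
        have hv' : ∀ _ : k < t.length, v = t[k] := by
          intro _
          simpa using hv hk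
        have hrec := ih k p p' v hndt hkt hpp hv' hCt
        have hhead : p' a = true := by rw [hpp a, hpa]; simp
        simp [List.filter_cons, hhead, hrec]

theorem pv_prefix_step : ∀ (q : List Int) (k : Nat), q.Nodup → (hk : k < q.length) →
    ∀ (C : PySem.Set Int),
    q.filter (fun j => PySem.Set.contains C j) = q.take k →
    q.filter (fun j => PySem.Set.contains (PySem.Set.add C q[k]) j) = q.take (k + 1) := by
  intro q k hnd hk C hC
  exact pv_prefix_gen q k _ _ (q[k]) hnd hk (fun j => pv_contains_add C (q[k]) j)
    (fun _ => rfl) hC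

theorem pv_rem_add {E : List (Int × Int)} (hn : (E.map (·.1)).Nodup)
    {C : PySem.Set Int} {F1 F2 : List (Int × Int)} {e : Int × Int}
    (hF : pvRem C E = F1 ++ e :: F2) :
    pvRem (PySem.Set.add C e.1) E = F1 ++ F2 := by
  have hrn0 : ((F1 ++ e :: F2).map (·.1)).Nodup := by
    rw [← hF]
    exact List.Nodup.sublist (List.Sublist.map _ List.filter_sublist) hn
  have hrn : (F1.map (·.1) ++ e.1 :: F2.map (·.1)).Nodup := by
    simpa [List.map_append] using hrn0
  obtain ⟨hn1, hn2, hdisj⟩ := List.nodup_append.mp hrn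
  have he2 : e.1 ∉ F2.map (·.1) := (List.nodup_cons.mp hn2).1
  have hF1 : ∀ x ∈ F1, x.1 ≠ e.1 := by
    intro x hx hxe
    exact hdisj x.1 (List.mem_map.mpr ⟨x, hx, rfl⟩) e.1 (List.mem_cons_self ..) hxe
  have hF2 : ∀ x ∈ F2, x.1 ≠ e.1 := fun x hx hxe =>
    he2 (hxe ▸ List.mem_map.mpr ⟨x, hx, rfl⟩)
  have step : pvRem (PySem.Set.add C e.1) E = (pvRem C E).filter (fun x => !(x.1 == e.1)) := by
    unfold pvRem
    rw [List.filter_filter]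
    apply List.filter_congr
    intro x _
    rw [pv_contains_add]
    cases PySem.Set.contains C x.1 <;> cases hb : (x.1 == e.1) <;> simp [hb]
  rw [step, hF, List.filter_append, List.filter_cons]
  have he : (!(e.1 == e.1)) = false := by simp
  simp only [he, Bool.false_eq_true, if_false]
  rw [List.filter_eq_self.mpr (fun x hx => by simp [hF1 x hx]),
    List.filter_eq_self.mpr (fun x hx => by simp [hF2 x hx])]

theorem pvQ_cons_pos {e0 : Int × Int} {E : List (Int × Int)} {lst : Int}
    (h : (e0.2 == lst) = true) : pvQ (e0 :: E) lst = e0.1 :: pvQ E lst := by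
  simp [pvQ, List.filter_cons, h]

theorem pvQ_cons_neg {e0 : Int × Int} {E : List (Int × Int)} {lst : Int}
    (h : (e0.2 == lst) = false) : pvQ (e0 :: E) lst = pvQ E lst := by
  simp [pvQ, List.filter_cons, h]

theorem pvRem_cons_out {C : PySem.Set Int} {e0 : Int × Int} {E : List (Int × Int)}
    (h : PySem.Set.contains C e0.1 = false) : pvRem C (e0 :: E) = e0 :: pvRem C E := by
  have h' : e0.1 ∉ C := fun hm => by rw [(PySem.Set.contains_iff _ _).mpr hm] at h; cases h
  simp [pvRem, List.filter_cons, h']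

theorem pvRem_cons_in {C : PySem.Set Int} {e0 : Int × Int} {E : List (Int × Int)}
    (h : PySem.Set.contains C e0.1 = true) : pvRem C (e0 :: E) = pvRem C E := by
  have h' : e0.1 ∈ C := (PySem.Set.contains_iff _ _).mp h
  simp [pvRem, List.filter_cons, h']

theorem pvQ_sub {E : List (Int × Int)} {l j : Int} (h : j ∈ pvQ E l) :
    j ∈ E.map (·.1) := by
  simp only [pvQ, List.mem_map, List.mem_filter] at h
  obtain ⟨e, ⟨he, _⟩, hj⟩ := h
  exact List.mem_map.mpr ⟨e, he, hj⟩

theorem pv_find (lst : Int) : ∀ (E : List (Int × Int)) (C : PySem.Set Int) (k : Nat),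
    (E.map (·.1)).Nodup →
    (pvQ E lst).filter (fun j => PySem.Set.contains C j) = (pvQ E lst).take k →
    ((pvQ E lst).length ≤ k → lst ∉ (pvRem C E).map (·.2))
    ∧ (∀ _ : k < (pvQ E lst).length,
        ∃ F1 e F2, pvRem C E = F1 ++ e :: F2 ∧ e.2 = lst
          ∧ e.1 = (pvQ E lst)[k]'(by omega) ∧ lst ∉ F1.map (·.2)) := by
  intro E
  induction E with
  | nil =>
    intro C k _ _
    constructor
    · intro _
      simp [pvRem]
    · intro hk
      simp [pvQ] at hk
  | cons e0 E' ih =>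
    intro C k hn hC
    have hn' : (E'.map (·.1)).Nodup := (List.nodup_cons.mp hn).2
    have he0 : e0.1 ∉ E'.map (·.1) := (List.nodup_cons.mp hn).1
    rcases hlab : (e0.2 == lst) with _ | _
    · -- e0's label is not lst
      rw [pvQ_cons_neg hlab] at hC ⊢
      obtain ⟨IH1, IH2⟩ := ih C k hn' hC
      rcases hca : PySem.Set.contains C e0.1 with _ | _
      · -- e0 not consumed: stays in rem but cannot match
        rw [pvRem_cons_out hca]
        constructor
        · intro hlen
          simp only [List.map_cons, List.mem_cons]
          rintro (h | h)
          · exact absurd (beq_iff_eq.mpr h.symm) (by simp [hlab])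
          · exact IH1 hlen h
        · intro hk
          obtain ⟨F1, e, F2, hdec, hl, hi, hnf⟩ := IH2 hk
          refine ⟨e0 :: F1, e, F2, by rw [hdec, List.cons_append], hl, hi, ?_⟩
          simp only [List.map_cons, List.mem_cons]
          rintro (h | h)
          · exact absurd (beq_iff_eq.mpr h.symm) (by simp [hlab])
          · exact hnf h
      · rw [pvRem_cons_in hca]
        exact ⟨IH1, IH2⟩
    · -- e0's label is lst
      have hlab' : e0.2 = lst := beq_iff_eq.mp hlab
      rw [pvQ_cons_pos hlab] at hC ⊢
      rcases hca : PySem.Set.contains C e0.1 with _ | _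
      · -- e0 not yet consumed: it is the first match; k must be 0
        rw [pvRem_cons_out hca]
        have hCf : (e0.1 :: pvQ E' lst).filter (fun j => PySem.Set.contains C j)
            = (pvQ E' lst).filter (fun j => PySem.Set.contains C j) := by
          have hm : e0.1 ∉ C := fun hmem => by
            rw [(PySem.Set.contains_iff _ _).mpr hmem] at hca; cases hca
          simp [List.filter_cons, hm]
        rw [hCf] at hC
        cases k with
        | succ k'' =>
          exfalso
          rw [List.take_succ_cons] at hC
          have : e0.1 ∈ pvQ E' lst :=
            List.mem_of_mem_filter (hC ▸ List.mem_cons_self ..)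
          exact he0 (pvQ_sub this)
        | zero =>
          constructor
          · intro hlen
            simp at hlen
          · intro _
            exact ⟨[], e0, pvRem C E', by simp, hlab', by simp, by simp⟩
      · -- e0 already consumed: k = k'' + 1
        rw [pvRem_cons_in hca]
        have hCf : (e0.1 :: pvQ E' lst).filter (fun j => PySem.Set.contains C j)
            = e0.1 :: (pvQ E' lst).filter (fun j => PySem.Set.contains C j) := by
          have hm : e0.1 ∈ C := (PySem.Set.contains_iff _ _).mp hca
          simp [List.filter_cons, hm]
        rw [hCf] at hC
        cases k with
        | zero =>
          exfalso
          simp at hC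
        | succ k'' =>
          rw [List.take_succ_cons] at hC
          have hC' := (List.cons.injEq .. ▸ hC : _ ∧ _).2
          obtain ⟨IH1, IH2⟩ := ih C k'' hn' hC'
          constructor
          · intro hlen
            exact IH1 (by simpa using hlen)
          · intro hk
            obtain ⟨F1, e, F2, hdec, hl, hi, hnf⟩ := IH2 (by simpa using hk)
            exact ⟨F1, e, F2, hdec, hl, by simpa using hi, hnf⟩

theorem pv_eraseIdx_append {α : Type} (ys : List α) (v : α) (zs : List α) :
    (ys ++ v :: zs).eraseIdx ys.length = ys ++ zs := by
  induction ys with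
  | nil => simp
  | cons y ys ih => simpa using ih

theorem pv_pop_append_cons {α : Type} (ys : List α) (v : α) (zs : List α) :
    PySem.List.pop? (ys ++ v :: zs) ((ys.length : Nat) : Int) = some (v, ys ++ zs) := by
  have hlt : ys.length < (ys ++ v :: zs).length := by simp
  rw [PySem.List.pop?_natCast _ _ hlt]
  have h1 : (ys ++ v :: zs)[ys.length]'hlt = v := by
    rw [List.getElem_append_right (Nat.le_refl _)]
    simp
  rw [h1, pv_eraseIdx_append]

theorem pv_index_append_cons (ys : List Int) (v : Int) (zs : List Int) (hv : v ∉ ys) :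
    PySem.List.index? (ys ++ v :: zs) v = some ys.length := by
  exact (PySem.List.index?_eq_some_iff _ _ _).mpr ⟨ys, zs, rfl, rfl, hv⟩

-- ===== counting machinery: unconsumed positions below a bound =====

def pvCnt (C : PySem.Set Int) (n : Nat) : Nat :=
  ((PySem.List.pyRange 0 (n : Int) 1).filter (fun i => !(PySem.Set.contains C i))).length

theorem pv_len_filter_fst {α : Type} (P : Int → Bool) (l : List (Int × α)) :
    (l.filter (fun x => P x.1)).length = ((l.map (·.1)).filter P).length := by
  induction l with
  | nil => rfl
  | cons a t ih =>
    simp only [List.filter_cons, List.map_cons]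
    cases P a.1 <;> simp [ih]

theorem pv_cnt_of_enum {α : Type} (C : PySem.Set Int) (xs : List α) :
    ((PySem.List.enumerate xs 0).filter (fun p => !(PySem.Set.contains C p.1))).length
      = pvCnt C xs.length := by
  rw [pv_len_filter_fst (fun i => !(PySem.Set.contains C i)),
    PySem.List.map_fst_enumerate]
  simp [pvCnt]

theorem pv_cnt_lt (C : PySem.Set Int) (j n : Nat) (hj : j ≤ n) :
    ((PySem.List.pyRange 0 (n : Int) 1).filter
        (fun i => decide (i < (j : Int)) && !(PySem.Set.contains C i))).length
      = pvCnt C j := by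
  rw [PySem.List.pyRange_one_append 0 (j : Int) (n : Int) (by positivity) (by exact_mod_cast hj),
    List.filter_append]
  have h2 : (PySem.List.pyRange (j : Int) (n : Int) 1).filter
      (fun i => decide (i < (j : Int)) && !(PySem.Set.contains C i)) = [] := by
    apply List.filter_eq_nil_iff.mpr
    intro i hi
    have := (PySem.List.mem_pyRange_one.mp hi).1
    simp [not_lt.mpr this]
  have h1 : (PySem.List.pyRange 0 (j : Int) 1).filter
      (fun i => decide (i < (j : Int)) && !(PySem.Set.contains C i))
      = (PySem.List.pyRange 0 (j : Int) 1).filter (fun i => !(PySem.Set.contains C i)) := by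
    apply List.filter_congr
    intro i hi
    have := (PySem.List.mem_pyRange_one.mp hi).2
    simp [this]
  rw [h1, h2, pvCnt]
  simp

theorem pv_cnt_mono (C : PySem.Set Int) (j n : Nat) (hj : j ≤ n) :
    pvCnt C j ≤ pvCnt C n := by
  unfold pvCnt
  rw [PySem.List.pyRange_one_append 0 (j : Int) (n : Int) (by positivity) (by exact_mod_cast hj),
    List.filter_append, List.length_append]
  omega

-- the prefix of a decomposition of a fst-increasing list is exactly the part below the pivot
theorem pv_prefix_of_pairwise {α : Type} (key : α → Int) {l F1 F2 : List α} {e : α}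
    (hp : l.Pairwise (fun a b => key a < key b)) (h : l = F1 ++ e :: F2) :
    F1 = l.filter (fun x => decide (key x < key e)) := by
  subst h
  rw [List.pairwise_append] at hp
  obtain ⟨_, hp2, hcross⟩ := hp
  rw [List.filter_append, List.filter_cons]
  have he : (decide (key e < key e)) = false := by simp
  have hF1 : F1.filter (fun x => decide (key x < key e)) = F1 :=
    List.filter_eq_self.mpr (fun x hx => by
      simpa using hcross x hx e (List.mem_cons_self ..))
  have hF2 : F2.filter (fun x => decide (key x < key e)) = [] :=
    List.filter_eq_nil_iff.mpr (fun x hx => by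
      have := (List.pairwise_cons.mp hp2).1 x hx
      simp [not_lt.mpr (le_of_lt this)])
  simp [hF1, hF2, he]

-- split the unconsumed part of enumerate O at an unconsumed position j
theorem pv_splitO (C : PySem.Set Int) (O : List Int) (j : Nat) (hj : j < O.length)
    (hjC : PySem.Set.contains C (j : Int) = false) :
    pvRem C (PySem.List.enumerate O 0)
      = pvRem C (PySem.List.enumerate (O.take j) 0)
        ++ ((j : Int), O[j])
        :: pvRem C (PySem.List.enumerate (O.drop (j + 1)) ((j : Int) + 1)) := by
  have hmem : ¬ ((j : Int) ∈ C) := fun hm => by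
    rw [(PySem.Set.contains_iff _ _).mpr hm] at hjC; cases hjC
  conv_lhs => rw [show O = O.take j ++ O[j] :: O.drop (j + 1) by
    rw [← List.drop_eq_getElem_cons hj, List.take_append_drop]]
  unfold pvRem
  rw [PySem.List.enumerate_append, PySem.List.enumerate_cons, List.filter_append,
    List.filter_cons]
  simp [List.length_take, Nat.min_eq_left (le_of_lt hj), hmem]

-- ===== the main simulation =====

theorem pv_loop (item0 L O nl : List Int) :
    ∀ (items : List Int) (C : PySem.Set Int) (nxt : PySem.Dict Int Int) (taken : List Int),
    (∀ j ∈ C, 0 ≤ j ∧ j < (O.length : Int)) →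
    (∀ l, 0 ≤ nxt.getD l 0) →
    (∀ l, (pvQ (PySem.List.enumerate L 0) l).filter (fun j => PySem.Set.contains C j)
          = (pvQ (PySem.List.enumerate L 0) l).take (nxt.getD l 0).toNat) →
    aReturns items ((pvRem C (PySem.List.enumerate L 0)).map (·.2))
        ((pvRem C (PySem.List.enumerate O 0)).map (·.2)).length = true →
    sortAgo item0 items ((pvRem C (PySem.List.enumerate L 0)).map (·.2))
        ((pvRem C (PySem.List.enumerate O 0)).map (·.2)) (nl ++ taken)
      = pvFinish item0 L O nl (altLoop O (pvBuild L) items nxt C taken) := by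
  intro items
  induction items with
  | nil =>
    intro C nxt taken _ _ _ _
    rw [sortAgo, altLoop]
    simp only [pvFinish, pvRem, if_pos]
  | cons lst rest ih =>
    intro C nxt taken hCB hC2 hC3 hSafe
    have hEnd : ((PySem.List.enumerate L 0).map (·.1)).Nodup := pv_enum_fst_nodup L 0
    have hq : (pvBuild L).getD lst [] = pvQ (PySem.List.enumerate L 0) lst := pv_build_q L lst
    have hk0 : 0 ≤ nxt.getD lst 0 := hC2 lst
    have hCq := hC3 lst
    by_cases hguard : ((pvQ (PySem.List.enumerate L 0) lst).length : Int) ≤ nxt.getD lst 0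
    · -- no remaining position for lst: A gets ValueError, B's cursor is exhausted
      have hlen : (pvQ (PySem.List.enumerate L 0) lst).length ≤ (nxt.getD lst 0).toNat := by
        omega
      have hnone := (pv_find lst (PySem.List.enumerate L 0) C (nxt.getD lst 0).toNat
        hEnd hCq).1 hlen
      have hidxn := (PySem.List.index?_eq_none_iff
        ((pvRem C (PySem.List.enumerate L 0)).map (·.2)) lst).mpr hnone
      rw [sortAgo, altLoop]
      simp only [hq, hguard, if_pos, hidxn, pvFinish, Bool.false_eq_true, if_false]
      rfl
    · push_neg at hguard
      have hkq : (nxt.getD lst 0).toNat < (pvQ (PySem.List.enumerate L 0) lst).length := by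
        omega
      obtain ⟨F1, e, F2, hdec, hel, hei, hnf⟩ :=
        (pv_find lst (PySem.List.enumerate L 0) C (nxt.getD lst 0).toNat hEnd hCq).2 hkq
      have heR : e ∈ pvRem C (PySem.List.enumerate L 0) := by
        rw [hdec]
        exact List.mem_append_right _ (List.mem_cons_self ..)
      have heE : e ∈ PySem.List.enumerate L 0 := List.mem_of_mem_filter heR
      have hjC : PySem.Set.contains C e.1 = false := by
        have := List.of_mem_filter heR
        simpa using this
      -- e.1 is a natural position in L
      obtain ⟨jn, hjnL, hje⟩ := (PySem.List.mem_enumerate_iff _ _ _).mp heE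
      have hj1 : e.1 = (jn : Int) := by rw [hje]; simp
      -- the chosen position (B side)
      have hiq : PySem.List.pyGetD (pvQ (PySem.List.enumerate L 0) lst) (nxt.getD lst 0) 0
          = e.1 := by
        rw [PySem.List.pyGetD_eq_getElem _ _ hk0 (by omega)]
        exact hei.symm
      -- A-side label list shape
      have hlab : (pvRem C (PySem.List.enumerate L 0)).map (·.2)
          = F1.map (·.2) ++ lst :: F2.map (·.2) := by
        rw [hdec]; simp [hel]
      have hidx : PySem.List.index? ((pvRem C (PySem.List.enumerate L 0)).map (·.2)) lst
          = some F1.length := by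
        rw [hlab]
        have := pv_index_append_cons (F1.map (·.2)) lst (F2.map (·.2)) hnf
        simpa using this
      -- counting: F1.length = number of unconsumed positions below jn
      have hpRem : (pvRem C (PySem.List.enumerate L 0)).Pairwise (fun a b => a.1 < b.1) :=
        (PySem.List.pairwise_lt_enumerate L 0).sublist List.filter_sublist
      have hF1eq : F1 = (pvRem C (PySem.List.enumerate L 0)).filter
          (fun x => decide (x.1 < e.1)) := pv_prefix_of_pairwise (·.1) hpRem hdec
      have hF1len : F1.length = pvCnt C jn := by
        rw [hF1eq, hj1, pvRem, List.filter_filter,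
          pv_len_filter_fst (fun i => decide (i < (jn : Int)) && !(PySem.Set.contains C i)),
          PySem.List.map_fst_enumerate]
        have := pv_cnt_lt C jn L.length (le_of_lt hjnL)
        simpa using this
      -- old side length
      have holen : ((pvRem C (PySem.List.enumerate O 0)).map (·.2)).length
          = pvCnt C O.length := by
        rw [List.length_map, pvRem, pv_cnt_of_enum]
      -- unfold the safety hypothesis
      rw [aReturns, hidx] at hSafe
      simp only at hSafe
      by_cases hlt : F1.length < ((pvRem C (PySem.List.enumerate O 0)).map (·.2)).length
      case neg =>
        rw [if_neg hlt] at hSafe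
        cases hSafe
      rw [if_pos hlt] at hSafe
      -- jn is inside old_list
      have hjO : jn < O.length := by
        by_contra hno
        push_neg at hno
        have := pv_cnt_mono C O.length jn hno
        omega
      -- split the old remainder at jn
      have hjCj : PySem.Set.contains C (jn : Int) = false := by rw [← hj1]; exact hjC
      have hsplit := pv_splitO C O jn hjO hjCj
      set G1 := pvRem C (PySem.List.enumerate (O.take jn) 0) with hG1def
      set T := pvRem C (PySem.List.enumerate (O.drop (jn + 1)) ((jn : Int) + 1)) with hTdef
      have hG1len : G1.length = pvCnt C jn := by
        rw [hG1def, pvRem, pv_cnt_of_enum]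
        congr 1
        simp [List.length_take]
        omega
      have hold : (pvRem C (PySem.List.enumerate O 0)).map (·.2)
          = G1.map (·.2) ++ O[jn] :: T.map (·.2) := by
        rw [hsplit]; simp
      -- the pops
      have hpop_old : PySem.List.pop?
          ((pvRem C (PySem.List.enumerate O 0)).map (·.2)) ((F1.length : Nat) : Int)
          = some (O[jn], G1.map (·.2) ++ T.map (·.2)) := by
        rw [hold]
        have hlen' : F1.length = (G1.map (·.2)).length := by
          rw [List.length_map, hF1len, hG1len]
        rw [hlen']
        exact pv_pop_append_cons (G1.map (·.2)) (O[jn]) (T.map (·.2))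
      have hpop_lab : PySem.List.pop?
          ((pvRem C (PySem.List.enumerate L 0)).map (·.2)) ((F1.length : Nat) : Int)
          = some (lst, F1.map (·.2) ++ F2.map (·.2)) := by
        rw [hlab]
        have := pv_pop_append_cons (F1.map (·.2)) lst (F2.map (·.2))
        simpa using this
      -- new consumed set
      have hrem_lab : pvRem (PySem.Set.add C e.1) (PySem.List.enumerate L 0) = F1 ++ F2 :=
        pv_rem_add hEnd hdec
      have hrem_old : pvRem (PySem.Set.add C e.1) (PySem.List.enumerate O 0) = G1 ++ T := by
        have hnO : ((PySem.List.enumerate O 0).map (·.1)).Nodup := pv_enum_fst_nodup O 0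
        have := pv_rem_add (E := PySem.List.enumerate O 0) hnO
          (e := ((jn : Int), O[jn])) (F1 := G1) (F2 := T) hsplit
        rw [hj1]
        exact this
      -- B-side chosen value
      have hval : PySem.List.pyGetD O e.1 0 = O[jn] := by
        rw [hj1, PySem.List.pyGetD_natCast, List.getD_eq_getElem O 0 hjO]
      -- the new invariants
      have hCB' : ∀ j ∈ PySem.Set.add C e.1, 0 ≤ j ∧ j < (O.length : Int) := by
        intro j hj
        rcases (PySem.Set.mem_add _ _ _).mp hj with hj' | hj'
        · exact hCB j hj'
        · subst hj'
          rw [hj1]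
          constructor
          · positivity
          · exact_mod_cast hjO
      have hC2' : ∀ l, 0 ≤ (nxt.insert lst (nxt.getD lst 0 + 1)).getD l 0 := by
        intro l
        rw [PySem.Dict.getD_insert]
        split_ifs with hl
        · omega
        · exact hC2 l
      have hC3' : ∀ l, (pvQ (PySem.List.enumerate L 0) l).filter
            (fun j => PySem.Set.contains (PySem.Set.add C e.1) j)
          = (pvQ (PySem.List.enumerate L 0) l).take
              (((nxt.insert lst (nxt.getD lst 0 + 1)).getD l 0).toNat) := by
        intro l
        rw [PySem.Dict.getD_insert]
        split_ifs with hl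
        · subst hl
          have hstep := pv_prefix_step (pvQ (PySem.List.enumerate L 0) l)
            (nxt.getD l 0).toNat (pvQ_nodup _ hEnd l) hkq C hCq
          rw [hei, hstep]
          congr 1
          omega
        · have hnot : e.1 ∉ pvQ (PySem.List.enumerate L 0) l := by
            intro hmem
            obtain ⟨e', he', h1, h2⟩ := pv_mem_q.mp hmem
            have : e' = e := List.inj_on_of_nodup_map hEnd he' heE h1
            exact hl (by rw [← h2, this, hel])
          rw [pv_filter_add_of_not_mem _ _ hnot C, hC3 l]
      -- the new safety
      have hSafe' : aReturns rest
          ((pvRem (PySem.Set.add C e.1) (PySem.List.enumerate L 0)).map (·.2))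
          ((pvRem (PySem.Set.add C e.1) (PySem.List.enumerate O 0)).map (·.2)).length
          = true := by
        rw [hrem_lab, hrem_old]
        have herase : (((pvRem C (PySem.List.enumerate L 0)).map (·.2)).eraseIdx F1.length)
            = (F1 ++ F2).map (·.2) := by
          rw [hlab]
          have := pv_eraseIdx_append (F1.map (·.2)) lst (F2.map (·.2))
          simpa using this
        have hlen1 : ((pvRem C (PySem.List.enumerate O 0)).map (·.2)).length - 1
            = ((G1 ++ T).map (·.2)).length := by
          rw [hold]
          simp
        rw [← herase, ← hlen1]
        exact hSafe
      -- the step itself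
      rw [sortAgo, altLoop]
      simp only [hq, hiq, hval, if_neg (not_le.mpr hguard), hidx, hpop_old, hpop_lab]
      have hihx := ih (PySem.Set.add C e.1) (nxt.insert lst (nxt.getD lst 0 + 1))
        (taken ++ [O[jn]]) hCB' hC2' hC3' hSafe'
      rw [hrem_lab, hrem_old] at hihx
      simp only [List.map_append, List.append_assoc] at hihx ⊢
      exact hihx

theorem main_equiv (list_item list_label old_list new_list : List Int)
    (h : Pre_sort_sns_list list_item list_label old_list new_list) :
    sort_sns_list list_item list_label old_list new_list
      = sort_sns_list_alt list_item list_label old_list new_list := by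
  have hemp : ∀ j : Int, PySem.Set.contains PySem.Set.empty j = false := fun _ => rfl
  have hrem0 : ∀ xs : List Int,
      pvRem PySem.Set.empty (PySem.List.enumerate xs 0) = PySem.List.enumerate xs 0 := by
    intro xs
    apply List.filter_eq_self.mpr
    intro e _
    rw [hemp e.1]
    rfl
  have hCB : ∀ j ∈ (PySem.Set.empty : PySem.Set Int), 0 ≤ j ∧ j < (old_list.length : Int) := by
    intro j hj
    simp [PySem.Set.empty] at hj
  have hC2 : ∀ l, 0 ≤ (PySem.Dict.empty : PySem.Dict Int Int).getD l 0 := by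
    intro l
    rw [PySem.Dict.getD_empty]
  have hC3 : ∀ l, (pvQ (PySem.List.enumerate list_label 0) l).filter
        (fun j => PySem.Set.contains PySem.Set.empty j)
      = (pvQ (PySem.List.enumerate list_label 0) l).take
          (((PySem.Dict.empty : PySem.Dict Int Int).getD l 0).toNat) := by
    intro l
    rw [PySem.Dict.getD_empty]
    simp
  have hSafe0 : aReturns list_item
      ((pvRem PySem.Set.empty (PySem.List.enumerate list_label 0)).map (·.2))
      ((pvRem PySem.Set.empty (PySem.List.enumerate old_list 0)).map (·.2)).length = true := by
    rw [hrem0, hrem0, PySem.List.map_snd_enumerate, List.length_map,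
      PySem.List.length_enumerate]
    exact h
  have h0 := pv_loop list_item list_label old_list new_list list_item
    PySem.Set.empty PySem.Dict.empty [] hCB hC2 hC3 hSafe0
  rw [hrem0, hrem0, PySem.List.map_snd_enumerate, PySem.List.map_snd_enumerate,
    List.append_nil] at h0
  rw [pv_alt_eq]
  exact h0

-- ===== VERDICT (by name: the statement is the Claim_ definition above) =====
theorem sort_sns_list_spec : Claim_equal_sort_sns_list := by
  intro li ll ol nl _ hpre
  exact main_equiv li ll ol nl hpre
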